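-- pv_equiv track=rewrite | github.com/sevgenn/ylab | functions/tic.py | get_side_diagonal_of_matrix
-- ===== SOURCE A (Python) =====
-- def get_side_diagonal_of_matrix(board, cell):
--     """Возвращает диагональ, проходящую через заданную ячейку параллельно побочной диагонали."""
--     len_row = len(board)
--     i_top_right = cell[0] + cell[1] - (len_row - 1)
--     i_top_right = i_top_right if i_top_right >= 0 else 0
--     j_top_right = cell[0] + cell[1]
--     j_top_right = j_top_right if j_top_right <= (len_row - 1) else (len_row - 1)
--     i_down_left = j_top_right
--     length = i_down_left - i_top_right + 1
--     return (board[i_top_right + k][j_top_right - k] for k in range(length))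
-- ===== SOURCE B (Python) =====
-- def get_side_diagonal_of_matrix(board, cell):
--     """Reflect the board vertically; the anti-diagonal through `cell` becomes a
--     main diagonal of the flipped board.  Walk that main diagonal top-down with a
--     while loop, then hand the collected cells back in reverse (= original
--     top-right-to-bottom-left order of A, i.e. increasing row index)."""
--     n = len(board)
--     flipped = board[::-1]
--     d = cell[0] + cell[1] - (n - 1)   # main-diagonal offset in the flipped board
--     t = max(0, -d)
--     out = []
--     while t < n and t + d < n:
--         out.append(flipped[t][t + d])
--         t += 1
--     return (x for x in reversed(out))
-- ===== Notes on version B (the rewrite author's own statement) =====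
-- stated objective: alternative
-- what changed: B reflects the board vertically so the anti-diagonal becomes a main diagonal, walks that main diagonal with a while loop into an accumulator, and returns the reversed accumulator, instead of A's clamped start-index/length arithmetic with a generator comprehension over range(length).
import Mathlib
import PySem

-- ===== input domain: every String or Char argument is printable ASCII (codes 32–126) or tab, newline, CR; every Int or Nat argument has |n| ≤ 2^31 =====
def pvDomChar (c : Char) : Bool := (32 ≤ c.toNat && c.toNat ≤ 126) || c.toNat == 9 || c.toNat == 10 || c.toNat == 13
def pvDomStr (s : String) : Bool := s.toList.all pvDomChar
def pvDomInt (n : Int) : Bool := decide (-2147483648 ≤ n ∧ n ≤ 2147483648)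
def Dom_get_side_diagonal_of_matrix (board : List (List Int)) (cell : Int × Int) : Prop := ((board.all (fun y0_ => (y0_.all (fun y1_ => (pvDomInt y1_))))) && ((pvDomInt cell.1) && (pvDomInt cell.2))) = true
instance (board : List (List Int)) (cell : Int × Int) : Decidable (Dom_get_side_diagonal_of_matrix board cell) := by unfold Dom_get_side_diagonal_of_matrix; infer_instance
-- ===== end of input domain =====

-- B reflects the board vertically so the anti-diagonal becomes a main diagonal,
-- walks that main diagonal with a while loop into an accumulator, and returns the
-- reversed accumulator (alternative decomposition; no clamped start/length
-- arithmetic, no range comprehension).  Both Pythons return a lazy iterator; the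
-- equivalence is about the sequence of values it yields when consumed.

-- ===== PORT A =====
def get_side_diagonal_of_matrix (board : List (List Int)) (cell : Int × Int) : List Int :=
  let len_row : Int := board.length
  let i_top_right := cell.1 + cell.2 - (len_row - 1)
  let i_top_right := if i_top_right ≥ 0 then i_top_right else 0
  let j_top_right := cell.1 + cell.2
  let j_top_right := if j_top_right ≤ len_row - 1 then j_top_right else len_row - 1
  let i_down_left := j_top_right
  let length := i_down_left - i_top_right + 1
  (PySem.List.pyRange 0 length 1).map (fun k =>
    PySem.List.pyGetD (PySem.List.pyGetD board (i_top_right + k) []) (j_top_right - k) 0)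

-- ===== PORT B =====
-- the while loop of Source B: walk the main diagonal (offset d) of the flipped board
-- from row t downwards, appending flipped[t][t+d]
def pvAltWalk (flipped : List (List Int)) (n d t : Int) : List Int :=
  if h : t < n ∧ t + d < n then
    PySem.List.pyGetD (PySem.List.pyGetD flipped t []) (t + d) 0 :: pvAltWalk flipped n d (t + 1)
  else []
termination_by (n - t).toNat
decreasing_by omega

def get_side_diagonal_of_matrix_alt (board : List (List Int)) (cell : Int × Int) : List Int :=
  let n : Int := board.length
  let flipped := (PySem.List.slice? board none none (-1)).getD []   -- board[::-1]
  let d := cell.1 + cell.2 - (n - 1)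
  let t := max 0 (-d)
  (pvAltWalk flipped n d t).reverse

-- ===== PRECONDITION & SPEC =====
-- Pre_ excludes exactly the inputs on which consuming A's generator raises
-- IndexError: some visited row is shorter than the anti-diagonal column it must
-- serve (B raises there too, while constructing its list).
def Pre_get_side_diagonal_of_matrix (board : List (List Int)) (cell : Int × Int) : Prop :=
  ∀ i ∈ List.range board.length,
    0 ≤ cell.1 + cell.2 - i → cell.1 + cell.2 - i ≤ (board.length : Int) - 1 →
      cell.1 + cell.2 - i < ((board.getD i []).length : Int)
instance (board : List (List Int)) (cell : Int × Int) : Decidable (Pre_get_side_diagonal_of_matrix board cell) := by unfold Pre_get_side_diagonal_of_matrix; infer_instance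

def pvWitness_get_side_diagonal_of_matrix : List (List Int) × (Int × Int) := ([[1, 2], [3, 4]], (0, 1))

def Spec_get_side_diagonal_of_matrix (board : List (List Int)) (cell : Int × Int) (out : List Int) : Prop := out = get_side_diagonal_of_matrix_alt board cell
instance (board : List (List Int)) (cell : Int × Int) (out : List Int) : Decidable (Spec_get_side_diagonal_of_matrix board cell out) := by unfold Spec_get_side_diagonal_of_matrix; infer_instance

-- ===== CLAIM (what is proved, stated in full; the proofs are below) =====
def Claim_equal_get_side_diagonal_of_matrix : Prop := ∀ (board : List (List Int)) (cell : Int × Int), Dom_get_side_diagonal_of_matrix board cell → Pre_get_side_diagonal_of_matrix board cell → Spec_get_side_diagonal_of_matrix board cell (get_side_diagonal_of_matrix board cell)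

-- ===== LEMMAS AND PROOFS =====

-- the while loop is the map over the clipped t-range [t, min n (n-d))
theorem pv_walk_eq (F : List (List Int)) (n d : Int) : ∀ t : Int,
    pvAltWalk F n d t
      = (PySem.List.pyRange t (min n (n - d)) 1).map
          (fun u => PySem.List.pyGetD (PySem.List.pyGetD F u []) (u + d) 0) := by
  intro t
  rw [pvAltWalk]
  by_cases h : t < n ∧ t + d < n
  · rw [dif_pos h]
    have hlt : t < min n (n - d) := by omega
    rw [PySem.List.pyRange_one_cons hlt, List.map_cons, pv_walk_eq F n d (t + 1)]
  · rw [dif_neg h, PySem.List.pyRange_one_eq_nil (by omega)]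
    rfl
termination_by t => (n - t).toNat
decreasing_by omega

-- reversing a map over a step-1 range re-indexes it by i ↦ n-1-i
theorem pv_map_reverse (h : Int → Int) (n : Int) : ∀ (a b : Int),
    ((PySem.List.pyRange a b 1).map h).reverse
      = (PySem.List.pyRange (n - b) (n - a) 1).map (fun i => h (n - 1 - i)) := by
  intro a b
  by_cases hab : b ≤ a
  · rw [PySem.List.pyRange_one_eq_nil hab, PySem.List.pyRange_one_eq_nil (by omega)]
    rfl
  · have hlt : a < b := by omega
    have hdec : ((b - 1 - a).toNat) < ((b - a).toNat) := by omega
    have hsp : PySem.List.pyRange a b 1 = PySem.List.pyRange a (b - 1) 1 ++ [b - 1] := by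
      have := PySem.List.pyRange_one_succ_right (a := a) (b := b - 1) (by omega)
      simpa using this
    rw [hsp, List.map_append, List.reverse_append]
    rw [pv_map_reverse h n a (b - 1)]
    have hcons : PySem.List.pyRange (n - b) (n - a) 1
        = (n - b) :: PySem.List.pyRange (n - b + 1) (n - a) 1 :=
      PySem.List.pyRange_one_cons (by omega)
    rw [hcons, List.map_cons]
    have h1 : n - (b - 1) = n - b + 1 := by ring
    have h2 : h (n - 1 - (n - b)) = h (b - 1) := by ring_nf
    simp [h1]
termination_by a b => (b - a).toNat

-- re-indexing a step-1 range map to start at 0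
theorem pv_map_shift (f : Int → Int) (a b : Int) :
    (PySem.List.pyRange a b 1).map f
      = (PySem.List.pyRange 0 (b - a) 1).map (fun k => f (a + k)) := by
  rw [PySem.List.pyRange_one, PySem.List.pyRange_one]
  simp [List.map_map, Function.comp]

theorem pv_ports_agree (board : List (List Int)) (cell : Int × Int) :
    get_side_diagonal_of_matrix board cell = get_side_diagonal_of_matrix_alt board cell := by
  unfold get_side_diagonal_of_matrix get_side_diagonal_of_matrix_alt
  rw [PySem.List.slice?_none_none_neg_one]
  set n : Int := (board.length : Int) with hn
  set s : Int := cell.1 + cell.2 with hs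
  set d : Int := s - (n - 1) with hd
  set itr : Int := if s - (n - 1) ≥ 0 then s - (n - 1) else 0 with hitr
  set jtr : Int := if s ≤ n - 1 then s else n - 1 with hjtr
  simp only [Option.getD_some]
  rw [pv_walk_eq, pv_map_reverse _ n (max 0 (-d)) (min n (n - d))]
  have he1 : n - min n (n - d) = itr := by rw [hitr]; split_ifs <;> omega
  have he2 : n - max 0 (-d) = jtr + 1 := by rw [hjtr]; split_ifs <;> omega
  rw [he1, he2, pv_map_shift _ itr (jtr + 1)]
  have hlen : jtr + 1 - itr = jtr - itr + 1 := by ring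
  rw [hlen]
  apply List.map_congr_left
  intro k hk
  rw [PySem.List.mem_pyRange_one] at hk
  have hitr0 : 0 ≤ itr := by rw [hitr]; split_ifs <;> omega
  have hjtrn : jtr ≤ n - 1 := by rw [hjtr]; split_ifs <;> omega
  have hsum : itr + jtr = s := by rw [hitr, hjtr]; split_ifs <;> omega
  -- the accessed cell: row i = itr + k, column s - i
  have hrow : PySem.List.pyGetD board.reverse (n - 1 - (itr + k)) []
      = PySem.List.pyGetD board (itr + k) [] := by
    have hb1 : 0 ≤ n - 1 - (itr + k) := by omega
    have hb2 : n - 1 - (itr + k) < (board.reverse.length : Int) := by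
      simp; omega
    have hb3 : 0 ≤ itr + k := by omega
    have hb4 : itr + k < (board.length : Int) := by omega
    rw [PySem.List.pyGetD_eq_getElem _ _ hb1 hb2,
        PySem.List.pyGetD_eq_getElem _ _ hb3 hb4]
    rw [List.getElem_reverse]
    congr 1
    omega
  have hcol : n - 1 - (itr + k) + d = jtr - k := by omega
  rw [hcol, hrow]

-- ===== VERDICT (by name: the statement is the Claim_ definition above) =====
theorem get_side_diagonal_of_matrix_spec : Claim_equal_get_side_diagonal_of_matrix := by
  intro board cell _ _
  unfold Spec_get_side_diagonal_of_matrix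
  exact pv_ports_agree board cell
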